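-- pv_equiv track=rewrite | github.com/gebdevalk/musics | src/algorittm/rhythm.py | prime_rhythm
-- ===== SOURCE A (Python) =====
-- import math
-- from typing import List, Tuple, Optional, Union
--
-- def prime_rhythm(length: int, include_one: bool = True) -> List[int]:
--     """
--     Generate rhythmic pattern based on prime number positions.
--
--     Parameters:
--     length (int): Length of the pattern
--     include_one (bool): Whether to include position 1 as a beat
--
--     Returns:
--     List[int]: Pattern with beats at prime number positions
--     """
--
--     def is_prime(num: int) -> bool:
--         if num < 2:
--             return False
--         for i in range(2, int(math.sqrt(num)) + 1):
--             if num % i == 0: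
--                 return False
--         return True
--
--     prime_positions = []
--     for i in range(length):
--         if (i == 1 and include_one) or (i > 1 and is_prime(i)):
--             prime_positions.append(i)
--
--     pattern = [1 if i in prime_positions else 0 for i in range(length)]
--     return pattern
-- ===== SOURCE B (Python) =====
-- def prime_rhythm(length: int, include_one: bool = True):
--     """One pass: compute each beat directly (odd-only trial division), no
--     prime-positions list and no O(p) membership scan per cell."""
--     def beat(i: int) -> int:
--         if i == 1:
--             return 1 if include_one else 0
--         if i == 2:
--             return 1
--         if i < 2 or i % 2 == 0:
--             return 0
--         d = 3
--         while d * d <= i: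
--             if i % d == 0:
--                 return 0
--             d += 2
--         return 1
--     return [beat(i) for i in range(length)]
-- ===== Notes on version B (the rewrite author's own statement) =====
-- stated objective: faster
-- what changed: B computes each beat directly in one pass with an odd-only trial division, eliminating A's intermediate prime-positions list and its O(p) linear membership scan per output cell.
import Mathlib
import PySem

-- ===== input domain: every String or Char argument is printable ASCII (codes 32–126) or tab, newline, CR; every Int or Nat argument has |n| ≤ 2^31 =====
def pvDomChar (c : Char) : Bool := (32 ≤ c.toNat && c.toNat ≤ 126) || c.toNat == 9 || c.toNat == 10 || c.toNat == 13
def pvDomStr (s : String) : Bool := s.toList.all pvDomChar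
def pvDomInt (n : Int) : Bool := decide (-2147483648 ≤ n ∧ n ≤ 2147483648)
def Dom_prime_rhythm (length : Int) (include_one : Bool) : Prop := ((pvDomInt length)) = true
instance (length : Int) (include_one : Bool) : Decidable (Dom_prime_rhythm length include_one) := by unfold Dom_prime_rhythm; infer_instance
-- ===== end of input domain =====

-- B replaces A's two-pass build (prime-position list + per-cell linear membership scan)
-- by a single pass computing each beat directly with odd-only trial division.

-- ===== PORT A =====
-- helper is_prime; int(math.sqrt(num)) ported as Nat.sqrt, which is exact for the
-- domain's |num| ≤ 2^31 (float sqrt followed by int() agrees with isqrt there)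
def pvIsPrime (num : Int) : Bool :=
  if num < 2 then false
  else (PySem.List.pyRange 2 ((Nat.sqrt num.toNat : Int) + 1) 1).all
        (fun i => !(PySem.Int.mod num i == 0))

def prime_rhythm (length : Int) (include_one : Bool) : List Int :=
  let prime_positions : List Int :=
    (PySem.List.pyRange 0 length 1).foldl
      (fun acc i =>
        if (i == 1 && include_one) || (decide (1 < i) && pvIsPrime i) then acc ++ [i] else acc) []
  (PySem.List.pyRange 0 length 1).map (fun i => if i ∈ prime_positions then (1 : Int) else 0)

-- ===== PORT B =====
-- the while loop of beat: d runs over 3,5,7,… while d*d ≤ i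
def pvBeatLoop (i : Int) (d : Nat) : Bool :=
  if h : (d * d : Int) ≤ i then
    if PySem.Int.mod i d == 0 then false else pvBeatLoop i (d + 2)
  else true
termination_by (i + 1 - (d * d : Int)).toNat
decreasing_by
  have hd : ((d : Int) + 2) * ((d : Int) + 2) = (d : Int) * d + 4 * d + 4 := by ring
  push_cast
  omega

def pvBeat (include_one : Bool) (i : Int) : Int :=
  if i == 1 then (if include_one then 1 else 0)
  else if i == 2 then 1
  else if i < 2 || PySem.Int.mod i 2 == 0 then 0
  else if pvBeatLoop i 3 then 1 else 0

def prime_rhythm_alt (length : Int) (include_one : Bool) : List Int :=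
  (PySem.List.pyRange 0 length 1).map (pvBeat include_one)

-- ===== PRECONDITION & SPEC =====
def Spec_prime_rhythm (length : Int) (include_one : Bool) (out : List Int) : Prop := out = prime_rhythm_alt length include_one
instance (length : Int) (include_one : Bool) (out : List Int) : Decidable (Spec_prime_rhythm length include_one out) := by unfold Spec_prime_rhythm; infer_instance

-- ===== CLAIM (what is proved, stated in full; the proofs are below) =====
def Claim_equal_prime_rhythm : Prop := ∀ (length : Int) (include_one : Bool), Dom_prime_rhythm length include_one → Spec_prime_rhythm length include_one (prime_rhythm length include_one)

-- ===== LEMMAS AND PROOFS =====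

-- A's condition on a position
def pvCond (include_one : Bool) (i : Int) : Bool :=
  (i == 1 && include_one) || (decide (1 < i) && pvIsPrime i)

-- "i has no divisor d with 2 ≤ d and d*d ≤ i"
def pvNoDiv (i : Int) : Prop := ∀ d : Int, 2 ≤ d → d * d ≤ i → ¬ d ∣ i

theorem pvIsPrime_iff (i : Int) (h2 : 2 ≤ i) : pvIsPrime i = true ↔ pvNoDiv i := by
  have hsq : ∀ d : Int, 0 ≤ d → (d * d ≤ i ↔ d.toNat ≤ Nat.sqrt i.toNat) := by
    intro d hd
    rw [Nat.le_sqrt]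
    constructor
    · intro h
      have : (d.toNat : Int) * d.toNat ≤ (i.toNat : Int) := by
        rw [Int.toNat_of_nonneg hd, Int.toNat_of_nonneg (by omega)]; exact h
      exact_mod_cast this
    · intro h
      have : (d.toNat : Int) * d.toNat ≤ (i.toNat : Int) := by exact_mod_cast h
      rwa [Int.toNat_of_nonneg hd, Int.toNat_of_nonneg (by omega)] at this
  unfold pvIsPrime pvNoDiv
  rw [if_neg (by omega), List.all_eq_true]
  constructor
  · intro h d hd hdd hdvd
    have hmem : d ∈ PySem.List.pyRange 2 ((Nat.sqrt i.toNat : Int) + 1) 1 := by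
      rw [PySem.List.mem_pyRange_one]
      have := (hsq d (by omega)).mp hdd
      omega
    have := h d hmem
    simp only [Bool.not_eq_eq_eq_not, Bool.not_true, beq_eq_false_iff_ne, ne_eq] at this
    exact this ((PySem.Int.mod_eq_zero_iff_dvd i d).mpr hdvd)
  · intro h d hmem
    rw [PySem.List.mem_pyRange_one] at hmem
    obtain ⟨hd2, hlt⟩ := hmem
    simp only [Bool.not_eq_eq_eq_not, Bool.not_true, beq_eq_false_iff_ne, ne_eq]
    intro hmod
    have hdd : d * d ≤ i := (hsq d (by omega)).mpr (by omega)
    exact h d hd2 hdd ((PySem.Int.mod_eq_zero_iff_dvd i d).mp hmod)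

theorem pvBeatLoop_iff (i : Int) :
    ∀ (n : Nat) (d : Nat), (i + 1 - (d * d : Int)).toNat ≤ n → 3 ≤ d → d % 2 = 1 →
    (pvBeatLoop i d = true ↔
      (∀ e : Nat, d ≤ e → e % 2 = 1 → (e * e : Int) ≤ i → ¬ ((e : Int) ∣ i))) := by
  intro n
  induction n with
  | zero =>
    intro d hm hd _
    have hexp : ¬ ((d : Int) * d ≤ i) := by omega
    rw [pvBeatLoop, dif_neg hexp]
    simp only [true_iff]
    intro e he _ hee
    exfalso
    have : (d : Int) * d ≤ (e : Int) * e := by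
      have : (d : Int) ≤ e := by exact_mod_cast he
      nlinarith
    omega
  | succ n ih =>
    intro d hm hd hdo
    by_cases hdd : ((d : Int) * d ≤ i)
    · rw [pvBeatLoop, dif_pos hdd]
      by_cases hmod : PySem.Int.mod i d = 0
      · have hdvd : ((d : Int)) ∣ i := (PySem.Int.mod_eq_zero_iff_dvd i d).mp hmod
        simp only [hmod, beq_self_eq_true, if_true]
        constructor
        · intro h; exact absurd h (by simp)
        · intro h; exact absurd hdvd (h d le_rfl hdo hdd)
      · rw [if_neg (by simpa using hmod)]
        have hexp : ((d + 2 : Nat) : Int) * ((d + 2 : Nat) : Int) = (d : Int) * d + 4 * d + 4 := by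
          push_cast; ring
        have hm' : (i + 1 - ((d + 2 : Nat) * (d + 2 : Nat) : Int)).toNat ≤ n := by
          push_cast at hexp ⊢; omega
        rw [ih (d + 2) hm' (by omega) (by omega)]
        constructor
        · intro h e he heo hee hdvd
          rcases Nat.lt_or_ge e (d + 2) with hlt | hge
          · have : e = d ∨ e = d + 1 := by omega
            rcases this with rfl | rfl
            · exact hmod ((PySem.Int.mod_eq_zero_iff_dvd i e).mpr hdvd)
            · omega
          · exact h e hge heo hee hdvd
        · intro h e he heo hee
          exact h e (by omega) heo hee
    · rw [pvBeatLoop, dif_neg hdd]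
      simp only [true_iff]
      intro e he _ hee
      exfalso
      have : (d : Int) * d ≤ (e : Int) * e := by
        have : (d : Int) ≤ e := by exact_mod_cast he
        nlinarith
      omega

-- bridge: for odd i ≥ 3, odd-only trial division from 3 decides pvNoDiv
theorem pvOddBridge (i : Int) (hodd : ¬ (2 : Int) ∣ i) :
    (∀ e : Nat, 3 ≤ e → e % 2 = 1 → (e * e : Int) ≤ i → ¬ ((e : Int) ∣ i)) ↔ pvNoDiv i := by
  constructor
  · intro h d hd2 hdd hdvd
    by_cases h2d : (2 : Int) ∣ d
    · exact hodd (dvd_trans h2d hdvd)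
    · have hd3 : 3 ≤ d := by omega
      have heo : d.toNat % 2 = 1 := by omega
      have hcast : ((d.toNat : Int)) = d := Int.toNat_of_nonneg (by omega)
      refine h d.toNat (by omega) heo ?_ ?_
      · rw [hcast]; exact hdd
      · rw [hcast]; exact hdvd
  · intro h e he _ hee
    exact h e (by exact_mod_cast (by omega : (2:Nat) ≤ e)) hee

theorem pvBeat_eq (include_one : Bool) (i : Int) (h0 : 0 ≤ i) :
    pvBeat include_one i = if pvCond include_one i then 1 else 0 := by
  by_cases h1 : i = 1
  · subst h1; cases include_one <;> simp [pvBeat, pvCond, pvIsPrime]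
  · by_cases h2 : i = 2
    · subst h2
      have hp : pvIsPrime 2 = true :=
        (pvIsPrime_iff 2 (by norm_num)).mpr (by intro d hd hdd _; nlinarith)
      have hc : pvCond include_one 2 = true := by simp [pvCond, hp]
      have hb : pvBeat include_one 2 = 1 := rfl
      rw [hb, hc]; simp
    · by_cases hlt : i < 2
      · have : i = 0 := by omega
        subst this; cases include_one <;> rfl
      · -- i ≥ 3
        have h3 : 3 ≤ i := by omega
        by_cases hev : (2 : Int) ∣ i
        · -- even i ≥ 4: both 0
          have hmod : PySem.Int.mod i 2 = 0 := (PySem.Int.mod_eq_zero_iff_dvd i 2).mpr hev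
          have hb : pvBeat include_one i = 0 := by
            unfold pvBeat
            rw [if_neg (by simpa using h1), if_neg (by simpa using h2)]
            rw [if_pos (by simp [hlt, hev])]
          have hp : pvIsPrime i = false := by
            rw [← Bool.not_eq_true, pvIsPrime_iff i (by omega)]
            intro h
            exact h 2 le_rfl (by omega) hev
          rw [hb]
          unfold pvCond
          rw [if_neg (by simp [hp, h1])]
        · -- odd i ≥ 3
          have hmod : PySem.Int.mod i 2 ≠ 0 := fun h => hev ((PySem.Int.mod_eq_zero_iff_dvd i 2).mp h)
          have hb : pvBeat include_one i =
              if pvBeatLoop i 3 then 1 else 0 := by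
            unfold pvBeat
            rw [if_neg (by simpa using h1), if_neg (by simpa using h2),
              if_neg (by simp [hlt, hev])]
          have hloop : pvBeatLoop i 3 = pvIsPrime i := by
            rw [Bool.eq_iff_iff,
              pvBeatLoop_iff i (i + 1 - 9).toNat 3 le_rfl le_rfl rfl,
              pvIsPrime_iff i (by omega)]
            exact pvOddBridge i hev
          rw [hb, hloop]
          unfold pvCond
          rw [show (i == 1) = false by simpa using h1, show decide (1 < i) = true by simp; omega]
          simp

theorem prime_rhythm_eq (length : Int) (include_one : Bool) :
    prime_rhythm length include_one = prime_rhythm_alt length include_one := by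
  unfold prime_rhythm prime_rhythm_alt
  rw [PySem.List.foldl_append_if_eq_filter]
  refine List.map_congr_left ?_
  intro i hi
  rw [PySem.List.mem_pyRange_one] at hi
  have hmem : (i ∈ List.nil ++ (PySem.List.pyRange 0 length 1).filter
      (fun i => (i == 1 && include_one) || (decide (1 < i) && pvIsPrime i))) ↔
      pvCond include_one i := by
    simp only [List.nil_append, List.mem_filter, PySem.List.mem_pyRange_one, pvCond]
    constructor
    · intro h; exact h.2
    · intro h; exact ⟨hi, h⟩
  rw [pvBeat_eq include_one i hi.1]
  by_cases hc : pvCond include_one i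
  · rw [if_pos (hmem.mpr hc), if_pos hc]
  · rw [if_neg (fun h => hc (hmem.mp h)), if_neg hc]

-- ===== VERDICT (by name: the statement is the Claim_ definition above) =====
theorem prime_rhythm_spec : Claim_equal_prime_rhythm := by
  intro length include_one _
  unfold Spec_prime_rhythm
  exact prime_rhythm_eq length include_one
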